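-- pv_equiv track=rewrite | github.com/ShpakovaA/qa-automation | HW27_List generator.py | list_item_generator
-- ===== SOURCE A (Python) =====
-- def list_item_generator(lst, iter_num=None):
--     if iter_num is not None:
--         count = 0
--         while count < iter_num:
--             for element in lst:
--                 yield element
--             count += 1
--     else:
--         while True:
--             for element in lst:
--                 yield element
-- ===== SOURCE B (Python) =====
-- def list_item_generator(lst, iter_num=None):
--     # One flat index space: output element i is lst[i % len(lst)].
--     # No pass counter and no inner for-loop over lst.
--     if iter_num is None:
--         i = 0
--         while True:
--             yield lst[i % len(lst)]
--             i += 1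
--     else:
--         for i in range(iter_num * len(lst)):
--             yield lst[i % len(lst)]
-- ===== Notes on version B (the rewrite author's own statement) =====
-- stated objective: alternative
-- what changed: B produces the stream from a single flat index space, yielding lst[i % len(lst)] for i in range(iter_num*len(lst)) (or for i = 0,1,2,... forever), replacing A's nested pass-counter loop with modular indexing.
import Mathlib
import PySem

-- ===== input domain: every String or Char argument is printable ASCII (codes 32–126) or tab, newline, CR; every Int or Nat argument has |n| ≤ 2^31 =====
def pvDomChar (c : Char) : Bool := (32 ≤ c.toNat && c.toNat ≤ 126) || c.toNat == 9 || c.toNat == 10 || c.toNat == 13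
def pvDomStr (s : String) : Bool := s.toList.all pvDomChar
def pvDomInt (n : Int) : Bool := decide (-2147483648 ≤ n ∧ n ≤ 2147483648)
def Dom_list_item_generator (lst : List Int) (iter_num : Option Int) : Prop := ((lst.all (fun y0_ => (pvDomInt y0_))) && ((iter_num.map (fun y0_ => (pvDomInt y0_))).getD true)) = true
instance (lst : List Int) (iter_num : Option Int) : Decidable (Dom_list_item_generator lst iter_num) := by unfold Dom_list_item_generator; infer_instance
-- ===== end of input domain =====

-- B replaces A's nested pass-counter loops by one flat index space: element i is lst[i % len(lst)]; objective: alternative.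
-- Both are Python generators; the ports return the finite list of yielded elements, so Pre_ requires iter_num ≠ None (with None the generator is infinite / never terminates).

-- ===== PORT A =====
-- A's 'while count < iter_num: for element in lst: yield element; count += 1'
def listItemGenLoopA (lst : List Int) (n : Int) (count : Int) : List Int :=
  if count < n then lst ++ listItemGenLoopA lst n (count + 1) else []
termination_by (n - count).toNat
decreasing_by omega

def list_item_generator (lst : List Int) (iter_num : Option Int) : List Int :=
  match iter_num with
  | some n => listItemGenLoopA lst n 0
  | none => []   -- unreachable under Pre_: the Python generator never terminates here

-- ===== PORT B =====
-- B's 'for i in range(iter_num * len(lst)): yield lst[i % len(lst)]'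
-- (pyGetD with default 0: the index i % len(lst) is always in range when the range is nonempty)
def list_item_generator_alt (lst : List Int) (iter_num : Option Int) : List Int :=
  match iter_num with
  | some n =>
      (PySem.List.pyRange 0 (n * (lst.length : Int)) 1).map
        (fun i => PySem.List.pyGetD lst (PySem.Int.mod i (lst.length : Int)) 0)
  | none => []   -- unreachable under Pre_: the Python generator never terminates here

-- ===== PRECONDITION & SPEC =====
-- Pre_ excludes iter_num = None: there the Python generator is infinite (or loops forever yielding nothing on an empty lst), so A returns no finite list.
def Pre_list_item_generator (lst : List Int) (iter_num : Option Int) : Prop := iter_num ≠ none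
instance (lst : List Int) (iter_num : Option Int) : Decidable (Pre_list_item_generator lst iter_num) := by unfold Pre_list_item_generator; infer_instance
def pvWitness_list_item_generator : List Int × Option Int := ([1, 2, 3], some 2)

def Spec_list_item_generator (lst : List Int) (iter_num : Option Int) (out : List Int) : Prop := out = list_item_generator_alt lst iter_num
instance (lst : List Int) (iter_num : Option Int) (out : List Int) : Decidable (Spec_list_item_generator lst iter_num out) := by unfold Spec_list_item_generator; infer_instance

-- ===== CLAIM (what is proved, stated in full; the proofs are below) =====
def Claim_equal_list_item_generator : Prop := ∀ (lst : List Int) (iter_num : Option Int), Dom_list_item_generator lst iter_num → Pre_list_item_generator lst iter_num → Spec_list_item_generator lst iter_num (list_item_generator lst iter_num)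

-- ===== LEMMAS AND PROOFS =====
lemma listItemGenLoopA_eq (lst : List Int) (n count : Int) :
    listItemGenLoopA lst n count = (List.replicate (n - count).toNat lst).flatten := by
  generalize h : (n - count).toNat = k
  induction k generalizing count with
  | zero =>
    rw [listItemGenLoopA]
    have : ¬ count < n := by omega
    simp [this]
  | succ k ih =>
    rw [listItemGenLoopA]
    have hlt : count < n := by omega
    simp only [hlt, if_true, List.replicate_succ, List.flatten_cons]
    rw [ih (count + 1) (by omega)]

-- one full pass of B's flat index space, indices k*L .. k*L + L - 1, reproduces lst
lemma segment_eq (lst : List Int) (k : Nat) (h : lst ≠ []) :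
    (PySem.List.pyRange ((k : Int) * lst.length) ((k : Int) * lst.length + lst.length) 1).map
      (fun i => PySem.List.pyGetD lst (PySem.Int.mod i (lst.length : Int)) 0) = lst := by
  have hL : 0 < (lst.length : Int) := by
    have := List.length_pos_iff.mpr h; exact_mod_cast this
  rw [PySem.List.pyRange_one]
  have hsub : ((k : Int) * lst.length + lst.length - (k : Int) * lst.length).toNat = lst.length := by
    omega
  rw [hsub, List.map_map]
  apply List.ext_getElem
  · simp
  · intro j hj hj'
    simp only [List.getElem_map, List.getElem_range, Function.comp_apply]
    have hjlen : j < lst.length := by simpa using hj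
    have hmod : PySem.Int.mod ((k : Int) * lst.length + (j : Int)) (lst.length : Int) = (j : Int) := by
      rw [PySem.Int.mod_eq_emod_of_pos hL]
      rw [add_comm, mul_comm, Int.add_mul_emod_self_left]
      exact Int.emod_eq_of_lt (by omega) (by exact_mod_cast hjlen)
    rw [hmod, PySem.List.pyGetD_natCast]
    simp [List.getD, hjlen]

lemma alt_eq_flatten (lst : List Int) (k : Nat) :
    (PySem.List.pyRange 0 ((k : Int) * lst.length) 1).map
      (fun i => PySem.List.pyGetD lst (PySem.Int.mod i (lst.length : Int)) 0) =
    (List.replicate k lst).flatten := by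
  induction k with
  | zero => simp [PySem.List.pyRange_one_eq_nil]
  | succ k ih =>
    rcases eq_or_ne lst [] with rfl | h
    · simp [PySem.List.pyRange_one_eq_nil]
    · have hL : (0 : Int) ≤ lst.length := by positivity
      have hsplit := PySem.List.pyRange_one_append 0 ((k : Int) * lst.length)
        ((k : Int) * lst.length + lst.length) (by positivity) (by nlinarith)
      rw [show ((((k : Nat) + 1 : Nat) : Int) * lst.length) = (k : Int) * lst.length + lst.length by push_cast; ring]
      rw [hsplit, List.map_append, ih, segment_eq lst k h,
        List.replicate_succ' , List.flatten_append]
      simp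

-- ===== VERDICT (by name: the statement is the Claim_ definition above) =====
theorem list_item_generator_spec : Claim_equal_list_item_generator := by
  intro lst iter_num _ hpre
  cases iter_num with
  | none => exact absurd rfl hpre
  | some n =>
    show listItemGenLoopA lst n 0 = _
    rw [listItemGenLoopA_eq]
    simp only [list_item_generator_alt]
    rcases le_or_gt n 0 with hn | hn
    · have h1 : (n - 0).toNat = 0 := by omega
      have h2 : PySem.List.pyRange 0 (n * lst.length) 1 = [] := by
        apply PySem.List.pyRange_one_eq_nil
        have : (0:Int) ≤ lst.length := by positivity
        nlinarith
      rw [h1, h2]; simp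
    · have hk : n = ((n.toNat : Int)) := by omega
      rw [show (n - 0) = n by ring, hk, alt_eq_flatten, Int.toNat_natCast]
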